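-- pv_equiv track=rewrite | github.com/joyce99/Xie-Yuxin | KE-MCW/data/getkp.py | getHas
-- ===== SOURCE A (Python) =====
-- def getHas(tAndaArr, keyphrase_list, has):
--     for i in range(len(keyphrase_list)):
--         curkp = keyphrase_list[i].split()
--         if len(curkp) == 0:
--             continue
--         j = 0
--         findStart = 0
--         kpStart = -1
--         curkpIndex = 0
--         while j < len(tAndaArr):
--             if findStart == 0:
--                 if tAndaArr[j] != curkp[0]:
--                     j += 1
--                     continue
--                 else:
--                     findStart = 1
--                     kpStart = j
--                     curkpIndex += 1
--                     if curkpIndex == len(curkp):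
--                         has += 1
--                         break
--                     j += 1
--                     continue
--             if curkpIndex < len(curkp) and tAndaArr[j] == curkp[curkpIndex]:
--                 j += 1
--                 curkpIndex += 1
--             elif curkpIndex < len(curkp) and tAndaArr[j] != curkp[curkpIndex]:
--                 j = kpStart + 1
--                 kpStart = -1
--                 findStart = 0
--                 curkpIndex = 0
--                 continue
--             if curkpIndex == len(curkp):
--                 has += 1
--                 break
--     return has
-- ===== SOURCE B (Python) =====
-- def getHas(tAndaArr, keyphrase_list, has):
--     n = len(tAndaArr)
--     for kp in keyphrase_list:
--         t = kp.split()
--         m = len(t)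
--         if m > 0 and any(tAndaArr[i:i + m] == t for i in range(n - m + 1)):
--             has += 1
--     return has
-- ===== Notes on version B (the rewrite author's own statement) =====
-- stated objective: simpler
-- what changed: Replaces A's four-variable backtracking state machine (j/findStart/kpStart/curkpIndex with manual restart at kpStart+1) by a direct comprehension: for each keyphrase, test whether any slice tAndaArr[i:i+m] equals the token list.
import Mathlib
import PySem

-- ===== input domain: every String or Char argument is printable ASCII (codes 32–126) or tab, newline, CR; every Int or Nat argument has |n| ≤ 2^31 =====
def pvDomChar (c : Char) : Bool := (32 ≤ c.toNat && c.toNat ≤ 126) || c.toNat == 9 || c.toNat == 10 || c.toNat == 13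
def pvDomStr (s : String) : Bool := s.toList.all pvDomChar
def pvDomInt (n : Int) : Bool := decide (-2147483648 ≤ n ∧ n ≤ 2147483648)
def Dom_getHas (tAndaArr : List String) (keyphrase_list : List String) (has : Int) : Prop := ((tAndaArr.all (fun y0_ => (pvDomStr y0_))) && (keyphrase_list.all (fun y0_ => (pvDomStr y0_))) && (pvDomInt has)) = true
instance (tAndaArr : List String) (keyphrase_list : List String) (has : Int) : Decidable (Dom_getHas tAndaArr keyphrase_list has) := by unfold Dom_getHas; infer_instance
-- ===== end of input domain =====

-- B replaces A's four-variable backtracking match automaton by a direct scan of start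
-- positions comparing slices; objective: simpler (same asymptotic cost).

-- ===== PORT A =====
-- the 'while j < len(tAndaArr)' loop of A, returning whether it broke with 'has += 1'
def getHasLoop (xs pat : List String) (j findStart kpStart curkpIndex : Int) : Bool :=
  if j < PySem.List.len xs then
    if findStart = 0 then
      if PySem.List.pyGetD xs j "" ≠ PySem.List.pyGetD pat 0 "" then
        getHasLoop xs pat (j + 1) findStart kpStart curkpIndex
      else
        if curkpIndex + 1 = PySem.List.len pat then true
        else getHasLoop xs pat (j + 1) 1 j (curkpIndex + 1)
    else
      if curkpIndex < PySem.List.len pat ∧ PySem.List.pyGetD xs j "" = PySem.List.pyGetD pat curkpIndex "" then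
        if curkpIndex + 1 = PySem.List.len pat then true
        else getHasLoop xs pat (j + 1) findStart kpStart (curkpIndex + 1)
      else if curkpIndex < PySem.List.len pat then
        getHasLoop xs pat (kpStart + 1) 0 (-1) 0
      else
        -- at the loop head curkpIndex never exceeds len(curkp) (it breaks at equality),
        -- so this branch is unreachable; Python's residual test 'curkpIndex == len(curkp)'
        decide (curkpIndex = PySem.List.len pat)
  else false
termination_by ((PySem.List.len xs - min (if findStart = 0 then j else kpStart) (PySem.List.len xs)).toNat,
                (PySem.List.len xs - j).toNat)
decreasing_by
  all_goals simp_all [PySem.List.len_eq, Prod.lex_iff]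
  all_goals omega

def getHas (tAndaArr : List String) (keyphrase_list : List String) (has : Int) : Int :=
  (PySem.List.pyRange 0 (PySem.List.len keyphrase_list) 1).foldl (fun has i =>
    let curkp := PySem.Str.split₀ (PySem.List.pyGetD keyphrase_list i "")
    if PySem.List.len curkp = 0 then has
    else if getHasLoop tAndaArr curkp 0 0 (-1) 0 then has + 1 else has) has

-- ===== PORT B =====
def getHas_alt (tAndaArr : List String) (keyphrase_list : List String) (has : Int) : Int :=
  keyphrase_list.foldl (fun has kp =>
    let t := PySem.Str.split₀ kp
    let m := PySem.List.len t
    if 0 < m ∧ ((PySem.List.pyRange 0 (PySem.List.len tAndaArr - m + 1) 1).any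
        (fun i => PySem.List.slice tAndaArr (some i) (some (i + m)) == t)) = true
    then has + 1 else has) has

-- ===== PRECONDITION & SPEC =====
def Spec_getHas (tAndaArr : List String) (keyphrase_list : List String) (has : Int) (out : Int) : Prop := out = getHas_alt tAndaArr keyphrase_list has
instance (tAndaArr : List String) (keyphrase_list : List String) (has : Int) (out : Int) : Decidable (Spec_getHas tAndaArr keyphrase_list has out) := by unfold Spec_getHas; infer_instance

-- ===== CLAIM (what is proved, stated in full; the proofs are below) =====
def Claim_equal_getHas : Prop := ∀ (tAndaArr : List String) (keyphrase_list : List String) (has : Int), Dom_getHas tAndaArr keyphrase_list has → Spec_getHas tAndaArr keyphrase_list has (getHas tAndaArr keyphrase_list has)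

-- ===== LEMMAS AND PROOFS =====

-- A's inner while-loop finds the pattern iff it occurs as a contiguous block
theorem getHasLoop_iff (xs pat : List String) (hp : pat ≠ []) (j findStart kpStart curkpIndex : Int)
    (hinv : (findStart = 0 ∧ curkpIndex = 0 ∧ 0 ≤ j ∧ j ≤ xs.length ∧
               ∀ s : ℕ, (s : Int) < j → ¬ pat <+: xs.drop s)
          ∨ (findStart = 1 ∧ 0 ≤ kpStart ∧ j = kpStart + curkpIndex ∧ 1 ≤ curkpIndex ∧
               (curkpIndex : Int) < pat.length ∧ j ≤ xs.length ∧
               pat.take curkpIndex.toNat = (xs.drop kpStart.toNat).take curkpIndex.toNat ∧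
               ∀ s : ℕ, (s : Int) < kpStart → ¬ pat <+: xs.drop s)) :
    (getHasLoop xs pat j findStart kpStart curkpIndex = true ↔ ∃ s : ℕ, pat <+: xs.drop s) := by
  have hm0 : 0 < pat.length := List.length_pos_iff.mpr hp
  revert hinv
  induction j, findStart, kpStart, curkpIndex using getHasLoop.induct xs pat with
  | case1 j kp ck hlt hne ih =>
    intro hinv
    rcases hinv with ⟨-, hck, hj0, hjn, hnm⟩ | ⟨hf, -⟩
    · rw [getHasLoop, if_pos hlt, if_pos rfl, if_pos hne]
      simp only [PySem.List.len_eq] at hlt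
      apply ih
      refine Or.inl ⟨rfl, hck, by omega, by omega, ?_⟩
      intro s hs hpre
      by_cases hsj : (s : Int) < j
      · exact hnm s hsj hpre
      · have hsj' : (s : Int) = j := by omega
        apply hne
        rw [PySem.List.pyGetD_eq_getElem xs "" hj0 hlt,
            PySem.List.pyGetD_eq_getElem pat "" le_rfl (by exact_mod_cast hm0)]
        simp only [Int.toNat_zero]
        have h0d : 0 < (xs.drop s).length := by
          simp only [List.length_drop]; omega
        have := hpre.getElem (i := 0) hm0
        rw [this]
        simp only [List.getElem_drop]
        congr 1
        omega
    · exact absurd hf (by norm_num)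
  | case2 j kp ck hlt heq hckm =>
    intro hinv
    rcases hinv with ⟨-, hck, hj0, hjn, hnm⟩ | ⟨hf, -⟩
    · rw [getHasLoop, if_pos hlt, if_pos rfl, if_neg heq, if_pos hckm]
      simp only [PySem.List.len_eq] at hlt hckm
      simp only [true_iff]
      subst hck
      have hm1 : pat.length = 1 := by omega
      refine ⟨j.toNat, ?_⟩
      rw [List.drop_eq_getElem_cons (by omega : j.toNat < xs.length)]
      obtain ⟨a, rfl⟩ := List.length_eq_one_iff.mp hm1
      rw [List.cons_prefix_cons]
      refine ⟨?_, List.nil_prefix⟩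
      have := not_not.mp (fun h => heq h)
      rw [PySem.List.pyGetD_eq_getElem xs "" hj0 hlt,
          PySem.List.pyGetD_eq_getElem [a] "" le_rfl (by simp)] at this
      simpa using this.symm
    · exact absurd hf (by norm_num)
  | case3 j kp ck hlt heq hckm ih =>
    intro hinv
    rcases hinv with ⟨-, hck, hj0, hjn, hnm⟩ | ⟨hf, -⟩
    · rw [getHasLoop, if_pos hlt, if_pos rfl, if_neg heq, if_neg hckm]
      simp only [PySem.List.len_eq] at hlt hckm
      apply ih
      subst hck
      have heq' := not_not.mp (fun h => heq h)
      rw [PySem.List.pyGetD_eq_getElem xs "" hj0 hlt,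
          PySem.List.pyGetD_eq_getElem pat "" le_rfl (by exact_mod_cast hm0)] at heq'
      simp only [Int.toNat_zero] at heq'
      refine Or.inr ⟨rfl, hj0, by omega, by omega, by omega, by omega, ?_, hnm⟩
      have h1 : ((0 : Int) + 1).toNat = 1 := rfl
      rw [h1, List.take_one, List.take_one]
      have hx0 : (xs.drop j.toNat).head? = some xs[j.toNat] := by
        rw [List.drop_eq_getElem_cons (by omega : j.toNat < xs.length)]
        rfl
      have hp0 : pat.head? = some pat[0] := by
        rw [List.head?_eq_getElem?, List.getElem?_eq_getElem hm0]
      rw [hx0, hp0, heq']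
    · exact absurd hf (by norm_num)
  | case4 j f kp ck hlt hf hmatch hckm =>
    intro hinv
    rcases hinv with ⟨hf0, -⟩ | ⟨-, hkp0, hjck, hck1, hckm', hjn, htake, hnm⟩
    · exact absurd hf0 hf
    · rw [getHasLoop, if_pos hlt, if_neg hf, if_pos hmatch, if_pos hckm]
      simp only [PySem.List.len_eq] at hlt hckm hckm'
      simp only [true_iff]
      refine ⟨kp.toNat, ?_⟩
      obtain ⟨hckm2, heq⟩ := hmatch
      rw [PySem.List.pyGetD_eq_getElem xs "" (by omega) hlt,
          PySem.List.pyGetD_eq_getElem pat "" (by omega) (by simpa using hckm2)] at heq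
      have hsucc : ck.toNat + 1 = pat.length := by omega
      have hpat : pat = List.take (ck.toNat + 1) pat := by
        rw [hsucc, List.take_of_length_le le_rfl]
      have hdl : ck.toNat < (xs.drop kp.toNat).length := by
        simp only [List.length_drop]; omega
      have hstep : List.take (ck.toNat + 1) pat
          = List.take (ck.toNat + 1) (xs.drop kp.toNat) := by
        rw [List.take_add_one, List.take_add_one, htake]
        congr 1
        rw [List.getElem?_eq_getElem (by omega : ck.toNat < pat.length),
            List.getElem?_eq_getElem hdl]
        simp only [Option.toList_some, List.getElem_drop, ← heq]
        simp only [show j.toNat = kp.toNat + ck.toNat by omega]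
      rw [hpat, hstep]
      exact List.take_prefix _ _
  | case5 j f kp ck hlt hf hmatch hckm ih =>
    intro hinv
    rcases hinv with ⟨hf0, -⟩ | ⟨hf1, hkp0, hjck, hck1, hckm', hjn, htake, hnm⟩
    · exact absurd hf0 hf
    · rw [getHasLoop, if_pos hlt, if_neg hf, if_pos hmatch, if_neg hckm]
      simp only [PySem.List.len_eq] at hlt hckm hckm'
      apply ih
      obtain ⟨hckm2, heq⟩ := hmatch
      rw [PySem.List.pyGetD_eq_getElem xs "" (by omega) hlt,
          PySem.List.pyGetD_eq_getElem pat "" (by omega) (by simpa using hckm2)] at heq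
      refine Or.inr ⟨hf1, hkp0, by omega, by omega, by omega, by omega, ?_, hnm⟩
      have hdl : ck.toNat < (xs.drop kp.toNat).length := by
        simp only [List.length_drop]; omega
      have hsucc : (ck + 1).toNat = ck.toNat + 1 := by omega
      rw [hsucc, List.take_add_one, List.take_add_one, htake]
      congr 1
      rw [List.getElem?_eq_getElem (by omega : ck.toNat < pat.length),
          List.getElem?_eq_getElem hdl]
      simp only [Option.toList_some, List.getElem_drop, ← heq]
      simp only [show j.toNat = kp.toNat + ck.toNat by omega]
  | case6 j f kp ck hlt hf hnmatch hcklt ih =>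
    intro hinv
    rcases hinv with ⟨hf0, -⟩ | ⟨hf1, hkp0, hjck, hck1, hckm', hjn, htake, hnm⟩
    · exact absurd hf0 hf
    · rw [getHasLoop, if_pos hlt, if_neg hf, if_neg hnmatch, if_pos hcklt]
      simp only [PySem.List.len_eq] at hlt hcklt hckm'
      apply ih
      refine Or.inl ⟨rfl, rfl, by omega, by omega, ?_⟩
      intro s hs hpre
      by_cases hskp : (s : Int) < kp
      · exact hnm s hskp hpre
      · have hskp' : (s : Int) = kp := by omega
        apply hnmatch
        refine ⟨by simpa using hcklt, ?_⟩
        rw [PySem.List.pyGetD_eq_getElem xs "" (by omega) (by simpa using hlt),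
            PySem.List.pyGetD_eq_getElem pat "" (by omega) (by exact_mod_cast hcklt)]
        have := hpre.getElem (i := ck.toNat) (by omega)
        rw [this]
        simp only [List.getElem_drop]
        congr 1
        omega
  | case7 j f kp ck hlt hf hnmatch hcknlt =>
    intro hinv
    rcases hinv with ⟨hf0, -⟩ | ⟨-, -, -, -, hckm', -⟩
    · exact absurd hf0 hf
    · simp only [PySem.List.len_eq] at hcknlt
      exact absurd hckm' hcknlt
  | case8 j f kp ck hnlt =>
    intro hinv
    rw [getHasLoop, if_neg hnlt]
    simp only [PySem.List.len_eq, not_lt] at hnlt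
    simp only [Bool.false_eq_true, false_iff, not_exists]
    intro s hpre
    rcases hinv with ⟨-, hck, hj0, hjn, hnm⟩ | ⟨-, hkp0, hjck, hck1, hckm', hjn, htake, hnm⟩
    · by_cases hsj : (s : Int) < j
      · exact hnm s hsj hpre
      · have : xs.drop s = [] := List.drop_eq_nil_iff.mpr (by omega)
        rw [this, List.prefix_nil] at hpre
        exact hp hpre
    · by_cases hskp : (s : Int) < kp
      · exact hnm s hskp hpre
      · have hlen := hpre.length_le
        simp only [List.length_drop] at hlen
        omega

-- B's any-over-start-positions test, characterised the same way
theorem any_slice_iff (xs t : List String) (ht : t ≠ []) :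
    ((PySem.List.pyRange 0 (PySem.List.len xs - PySem.List.len t + 1) 1).any
        (fun i => PySem.List.slice xs (some i) (some (i + PySem.List.len t)) == t)) = true
      ↔ ∃ s : ℕ, t <+: xs.drop s := by
  simp only [List.any_eq_true, PySem.List.mem_pyRange_one, PySem.List.len_eq, beq_iff_eq]
  constructor
  · rintro ⟨i, ⟨hi0, hi1⟩, hsl⟩
    refine ⟨i.toNat, ?_⟩
    rw [PySem.List.slice_toNat xs hi0 (by omega)] at hsl
    rw [← hsl]
    exact List.take_prefix _ _
  · rintro ⟨s, hs⟩
    have hle : s + t.length ≤ xs.length := by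
      have := hs.length_le
      simp only [List.length_drop] at this
      have hne : t.length ≠ 0 := fun h => ht (List.eq_nil_of_length_eq_zero h)
      omega
    refine ⟨(s : Int), ⟨by positivity, by omega⟩, ?_⟩
    rw [PySem.List.slice_toNat xs (by positivity) (by positivity)]
    have hm : ((s : Int) + (t.length : Int)).toNat - (s:Int).toNat = t.length := by omega
    rw [hm, Int.toNat_natCast]
    exact ((List.prefix_iff_eq_take.mp hs)).symm

-- ===== VERDICT (by name: the statement is the Claim_ definition above) =====
theorem getHas_spec : Claim_equal_getHas := by
  intro xs kpl has _
  unfold Spec_getHas getHas getHas_alt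
  rw [PySem.List.foldl_pyRange_zero_pyGetD kpl ""
        (fun has kp =>
          let curkp := PySem.Str.split₀ kp
          if PySem.List.len curkp = 0 then has
          else if getHasLoop xs curkp 0 0 (-1) 0 then has + 1 else has) has]
  refine PySem.List.foldl_congr_mem kpl _ _ has ?_
  intro acc kp _
  simp only [PySem.List.len_eq]
  by_cases h0 : PySem.Str.split₀ kp = []
  · simp [h0]
  · have hlen : 0 < (PySem.Str.split₀ kp).length := List.length_pos_iff.mpr h0
    have h1 : getHasLoop xs (PySem.Str.split₀ kp) 0 0 (-1) 0 = true ↔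
        ∃ s : ℕ, PySem.Str.split₀ kp <+: xs.drop s :=
      getHasLoop_iff xs _ h0 0 0 (-1) 0
        (Or.inl ⟨rfl, rfl, le_refl 0, by positivity, by omega⟩)
    have h2 := any_slice_iff xs (PySem.Str.split₀ kp) h0
    simp only [PySem.List.len_eq] at h2
    have hlenZ : ¬ (((PySem.Str.split₀ kp).length : Int) = 0) := by
      exact_mod_cast Nat.pos_iff_ne_zero.mp hlen
    rw [if_neg hlenZ]
    rcases Classical.em (∃ s : ℕ, PySem.Str.split₀ kp <+: xs.drop s) with he | he
    · rw [if_pos (h1.mpr he), if_pos ⟨by exact_mod_cast hlen, h2.mpr he⟩]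
    · rw [if_neg (fun h => he (h1.mp h)), if_neg (fun hc => he (h2.mp hc.2))]
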